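-- pv_equiv track=rewrite | github.com/LickIt/usaco | 2.2/lamps/lamps.py | apply
-- ===== SOURCE A (Python) =====
-- def apply(but, lamps):
--     if but == 1:
--         return [not x for x in lamps]
--     if but == 2:
--         return [not x if (idx+1) % 2 == 1 else x for idx, x in enumerate(lamps)]
--     if but == 3:
--         return [not x if (idx+1) % 2 == 0 else x for idx, x in enumerate(lamps)]
--     if but == 4:
--         return [not x if (idx+1) % 3 == 1 else x for idx, x in enumerate(lamps)]
-- ===== SOURCE B (Python) =====
-- _TABLE = {1: (0, 1), 2: (0, 2), 3: (1, 2), 4: (0, 3)}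
--
-- def apply(but, lamps):
--     se = _TABLE.get(but)
--     if se is None:
--         return None
--     start, step = se
--     result = list(lamps)
--     for i in range(start, len(result), step):
--         result[i] = not result[i]
--     return result
-- ===== Notes on version B (the rewrite author's own statement) =====
-- stated objective: alternative
-- what changed: B replaces A's per-button enumerate-and-test-modulus list comprehensions by a button->(start,step) lookup table and a single strided in-place flip loop over a copy, visiting only the toggled positions.
-- outside the precondition, e.g. on apply(5, [True, False]): A returns None, B returns None
import Mathlib
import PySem

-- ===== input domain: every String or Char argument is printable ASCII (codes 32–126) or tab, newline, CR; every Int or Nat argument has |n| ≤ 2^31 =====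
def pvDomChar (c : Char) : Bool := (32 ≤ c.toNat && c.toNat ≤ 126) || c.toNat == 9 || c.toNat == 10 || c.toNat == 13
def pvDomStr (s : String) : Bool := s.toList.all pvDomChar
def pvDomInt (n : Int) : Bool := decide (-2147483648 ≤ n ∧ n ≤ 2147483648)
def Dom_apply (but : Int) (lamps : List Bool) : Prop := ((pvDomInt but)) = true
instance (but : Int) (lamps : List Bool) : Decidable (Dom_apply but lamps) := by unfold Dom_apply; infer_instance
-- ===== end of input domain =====

-- B re-decomposes A: instead of testing a modulus on every enumerated lamp, it looks the
-- button up in a (start, step) table and flips only the strided positions (alternative decomposition).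
-- A returns None (no List value) for but ∉ {1,2,3,4}; those inputs are outside Pre_apply.

-- ===== PORT A =====
def apply (but : Int) (lamps : List Bool) : List Bool :=
  if but = 1 then lamps.map (fun x => !x)
  else if but = 2 then
    (PySem.List.enumerate lamps).map (fun p => if PySem.Int.mod (p.1 + 1) 2 = 1 then !p.2 else p.2)
  else if but = 3 then
    (PySem.List.enumerate lamps).map (fun p => if PySem.Int.mod (p.1 + 1) 2 = 0 then !p.2 else p.2)
  else if but = 4 then
    (PySem.List.enumerate lamps).map (fun p => if PySem.Int.mod (p.1 + 1) 3 = 1 then !p.2 else p.2)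
  else []  -- Python returns None here (not a List value); excluded by Pre_apply

-- ===== PORT B =====
def applyTable : PySem.Dict Int (Int × Int) :=
  PySem.Dict.ofList [(1, (0, 1)), (2, (0, 2)), (3, (1, 2)), (4, (0, 3))]

def apply_alt (but : Int) (lamps : List Bool) : List Bool :=
  match applyTable.get? but with
  | none => []  -- Python returns None here (not a List value); excluded by Pre_apply
  | some (start, step) =>
    (PySem.List.pyRange start (lamps.length : Int) step).foldl
      (fun result i => result.set i.toNat (!(result.getD i.toNat false))) lamps

-- ===== PRECONDITION & SPEC =====
-- Pre_ excludes exactly the buttons for which A returns None, which is not a value of List Bool.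
def Pre_apply (but : Int) (lamps : List Bool) : Prop := but = 1 ∨ but = 2 ∨ but = 3 ∨ but = 4
instance (but : Int) (lamps : List Bool) : Decidable (Pre_apply but lamps) := by unfold Pre_apply; infer_instance
def pvWitness_apply : Int × List Bool := (2, [true, false, true])

def Spec_apply (but : Int) (lamps : List Bool) (out : List Bool) : Prop := out = apply_alt but lamps
instance (but : Int) (lamps : List Bool) (out : List Bool) : Decidable (Spec_apply but lamps out) := by unfold Spec_apply; infer_instance

-- ===== CLAIM (what is proved, stated in full; the proofs are below) =====
def Claim_equal_apply : Prop := ∀ (but : Int) (lamps : List Bool), Dom_apply but lamps → Pre_apply but lamps → Spec_apply but lamps (apply but lamps)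

-- ===== LEMMAS AND PROOFS =====

-- The strided set-fold of B, over any duplicate-free in-range index list, flips exactly the
-- member positions: it equals a flip-if-member map over the enumeration.
lemma foldl_set_eq_map (is : List Int) (L : List Bool)
    (hpos : ∀ i ∈ is, 0 ≤ i ∧ i < (L.length : Int)) (hnd : is.Nodup) :
    is.foldl (fun r i => r.set i.toNat (!(r.getD i.toNat false))) L
      = (PySem.List.enumerate L).map (fun p => if p.1 ∈ is then !p.2 else p.2) := by
  induction is generalizing L with
  | nil =>
    simp only [List.foldl_nil, List.not_mem_nil, if_false]
    exact (PySem.List.map_snd_enumerate L 0).symm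
  | cons i is ih =>
    obtain ⟨hi0, hilt⟩ := hpos i (List.mem_cons_self ..)
    have hiN : i.toNat < L.length := by omega
    simp only [List.foldl_cons]
    set L' := L.set i.toNat (!(L.getD i.toNat false)) with hL'
    have hlen' : L'.length = L.length := by simp [hL']
    have hnd' : is.Nodup := hnd.of_cons
    have hni : i ∉ is := by
      intro h; exact (List.nodup_cons.mp hnd).1 h
    rw [ih L' (by intro j hj; have := hpos j (List.mem_cons_of_mem _ hj); omega) hnd']
    apply List.ext_getElem
    · simp [PySem.List.length_enumerate, hlen']
    · intro k h1 h2
      have hk : k < L.length := by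
        simpa [PySem.List.length_enumerate, hlen'] using h1
      simp only [List.getElem_map, PySem.List.getElem_enumerate, zero_add]
      have hget' : L'[k]'(by omega) = if i.toNat = k then !(L[k]) else L[k] := by
        simp only [hL', List.getElem_set, List.getD_eq_getElem L false hiN]
        rcases eq_or_ne i.toNat k with he | he <;> simp [he]
      by_cases hik : (k : Int) = i
      · have hkn : i.toNat = k := by omega
        have hmem : (k : Int) ∈ i :: is := by rw [hik]; exact List.mem_cons_self ..
        have hnmem : (k : Int) ∉ is := by rw [hik]; exact hni
        simp [hget', hkn, hmem, hnmem]
      · have hkn : ¬ (i.toNat = k) := by omega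
        have hmem : ((k : Int) ∈ i :: is) ↔ ((k : Int) ∈ is) := by
          simp [List.mem_cons, hik]
        simp [hget', hkn, hmem]

lemma nodup_pyRange_pos (a b s : Int) (hs : 0 < s) : (PySem.List.pyRange a b s).Nodup := by
  rw [PySem.List.pyRange_of_pos a b hs]
  refine List.Nodup.map ?_ (List.nodup_range)
  intro x y h
  have h2 := add_left_cancel h
  have h3 := mul_left_cancel₀ (by omega : (s : Int) ≠ 0) h2
  exact_mod_cast h3

-- B's fold for a concrete (start, step) equals a flip-if map over the enumeration, with the
-- membership condition rewritten as an arithmetic condition on the index.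
lemma alt_case (L : List Bool) (start step : Int) (h0 : 0 ≤ start) (hs : 0 < step)
    (cond : Int → Prop) [DecidablePred cond]
    (hc : ∀ (k : Nat), k < L.length →
      (cond (k : Int) ↔ start ≤ (k : Int) ∧ step ∣ (k : Int) - start)) :
    (PySem.List.pyRange start (L.length : Int) step).foldl
        (fun result i => result.set i.toNat (!(result.getD i.toNat false))) L
      = (PySem.List.enumerate L).map (fun p => if cond p.1 then !p.2 else p.2) := by
  rw [foldl_set_eq_map _ _ (by
        intro i hi
        have := (PySem.List.mem_pyRange_iff_of_pos hs i).mp hi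
        omega)
      (nodup_pyRange_pos _ _ _ hs)]
  apply List.ext_getElem
  · simp [PySem.List.length_enumerate]
  · intro k h1 h2
    have hk : k < L.length := by simpa [PySem.List.length_enumerate] using h1
    simp only [List.getElem_map, PySem.List.getElem_enumerate, zero_add]
    have : ((k : Int) ∈ PySem.List.pyRange start (L.length : Int) step) ↔ cond (k : Int) := by
      rw [PySem.List.mem_pyRange_iff_of_pos hs, hc k hk]
      constructor
      · rintro ⟨h, _, hd⟩; exact ⟨h, hd⟩
      · rintro ⟨h, hd⟩; exact ⟨h, by omega, hd⟩
    simp [this]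

-- ===== VERDICT (by name: the statement is the Claim_ definition above) =====
theorem apply_spec : Claim_equal_apply := by
  intro but lamps _ hpre
  unfold Spec_apply
  rcases hpre with h | h | h | h <;> subst h
  · -- but = 1
    have ht : applyTable.get? 1 = some (0, 1) := by decide
    rw [show apply_alt 1 lamps
        = (PySem.List.pyRange 0 (lamps.length : Int) 1).foldl
            (fun result i => result.set i.toNat (!(result.getD i.toNat false))) lamps
        from by rw [apply_alt, ht]]
    rw [alt_case lamps 0 1 (by omega) (by omega) (fun j => True)
        (by intro k hk; simp)]
    simp only [if_true]
    rw [show (fun p : Int × Bool => !p.2) = (fun x => !x) ∘ (fun p : Int × Bool => p.2) from rfl,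
        ← List.map_map, PySem.List.map_snd_enumerate]
    simp [apply]
  · -- but = 2
    have ht : applyTable.get? 2 = some (0, 2) := by decide
    rw [show apply_alt 2 lamps
        = (PySem.List.pyRange 0 (lamps.length : Int) 2).foldl
            (fun result i => result.set i.toNat (!(result.getD i.toNat false))) lamps
        from by rw [apply_alt, ht]]
    rw [alt_case lamps 0 2 (by omega) (by omega) (fun j => PySem.Int.mod (j + 1) 2 = 1)
        (by intro k hk
            simp only [PySem.Int.mod_eq_emod_of_pos (by omega : (0:Int) < 2)]
            omega)]
    simp [apply]
  · -- but = 3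
    have ht : applyTable.get? 3 = some (1, 2) := by decide
    rw [show apply_alt 3 lamps
        = (PySem.List.pyRange 1 (lamps.length : Int) 2).foldl
            (fun result i => result.set i.toNat (!(result.getD i.toNat false))) lamps
        from by rw [apply_alt, ht]]
    rw [alt_case lamps 1 2 (by omega) (by omega) (fun j => PySem.Int.mod (j + 1) 2 = 0)
        (by intro k hk
            simp only [PySem.Int.mod_eq_emod_of_pos (by omega : (0:Int) < 2)]
            omega)]
    simp [apply]
  · -- but = 4
    have ht : applyTable.get? 4 = some (0, 3) := by decide
    rw [show apply_alt 4 lamps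
        = (PySem.List.pyRange 0 (lamps.length : Int) 3).foldl
            (fun result i => result.set i.toNat (!(result.getD i.toNat false))) lamps
        from by rw [apply_alt, ht]]
    rw [alt_case lamps 0 3 (by omega) (by omega) (fun j => PySem.Int.mod (j + 1) 3 = 1)
        (by intro k hk
            simp only [PySem.Int.mod_eq_emod_of_pos (by omega : (0:Int) < 3)]
            omega)]
    simp [apply]
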